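-- pv_equiv track=rewrite | github.com/khorwood/advent-of-code | 2023/day03/day03.py | get_adjacent_gear
-- ===== SOURCE A (Python) =====
-- def get_adjacent_gear(number, symbols):
--     num, coords = number
--     x, y = coords
--     out = []
--     for u, v in symbols:
--         for l in range(len(num)):
--             if (x+l,y) == (u-1,v-1) or (x+l,y) == (u,v-1) or (x+l,y) == (u+1,v-1):
--                 out.append(((u,v), num))
--                 break
--             if (x+l,y) == (u-1, v) or (x+l,y) == (u+1,v):
--                 out.append(((u,v), num))
--                 break
--             if (x+l,y) == (u-1,v+1) or (x+l,y) == (u,v+1) or (x+l,y) == (u+1,v+1):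
--                 out.append(((u,v), num))
--                 break
--     return out
-- ===== SOURCE B (Python) =====
-- def get_adjacent_gear(number, symbols):
--     num, (x, y) = number
--     L = len(num)
--     out = []
--     for u, v in symbols:
--         # O(1) bounding-box test instead of scanning every digit position:
--         # some digit cell (x+l, y) is one of the 8 neighbours of (u, v)
--         # iff the rows are within 1 and u lies in [x-1, x+L], except the
--         # degenerate case where the only overlap is the symbol cell itself.
--         if L and abs(v - y) <= 1 and x - 1 <= u <= x + L:
--             if v == y and L == 1 and u == x:
--                 continue
--             out.append(((u, v), num))
--     return out
-- ===== Notes on version B (the rewrite author's own statement) =====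
-- stated objective: faster
-- what changed: replaces the inner per-digit-position scan (with break) by an O(1) bounding-box interval test per symbol
import Mathlib
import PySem

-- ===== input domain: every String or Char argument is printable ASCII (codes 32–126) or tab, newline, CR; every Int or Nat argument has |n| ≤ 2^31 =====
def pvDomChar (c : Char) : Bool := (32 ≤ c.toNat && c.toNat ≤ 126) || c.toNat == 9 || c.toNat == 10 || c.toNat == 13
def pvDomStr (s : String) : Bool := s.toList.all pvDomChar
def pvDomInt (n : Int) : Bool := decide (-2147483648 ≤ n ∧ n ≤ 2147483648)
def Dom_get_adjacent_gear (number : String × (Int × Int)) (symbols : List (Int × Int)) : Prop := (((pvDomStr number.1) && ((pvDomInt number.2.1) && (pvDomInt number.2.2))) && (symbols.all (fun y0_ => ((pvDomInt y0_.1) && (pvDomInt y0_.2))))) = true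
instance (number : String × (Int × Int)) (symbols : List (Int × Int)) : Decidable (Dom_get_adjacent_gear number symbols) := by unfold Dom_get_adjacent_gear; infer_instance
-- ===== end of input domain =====

-- B replaces A's inner per-digit scan by an O(1) bounding-box test per symbol (objective: faster).

-- ===== PORT A =====
-- the inner 'for l in range(len(num))' loop with break: returns true iff some l triggers an append
def pvInnerA (x y u v : Int) : List Int → Bool
  | [] => false
  | l :: ls =>
    if ((x+l, y) = (u-1, v-1) ∨ (x+l, y) = (u, v-1) ∨ (x+l, y) = (u+1, v-1)) then true
    else if ((x+l, y) = (u-1, v) ∨ (x+l, y) = (u+1, v)) then true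
    else if ((x+l, y) = (u-1, v+1) ∨ (x+l, y) = (u, v+1) ∨ (x+l, y) = (u+1, v+1)) then true
    else pvInnerA x y u v ls

def get_adjacent_gear (number : String × (Int × Int)) (symbols : List (Int × Int)) : List ((Int × Int) × String) :=
  let num := number.1
  let x := number.2.1
  let y := number.2.2
  symbols.foldl (fun out uv =>
    if pvInnerA x y uv.1 uv.2 (PySem.List.pyRange 0 (num.toList.length : Int) 1) then
      out ++ [((uv.1, uv.2), num)]
    else out) []

-- ===== PORT B =====
def get_adjacent_gear_alt (number : String × (Int × Int)) (symbols : List (Int × Int)) : List ((Int × Int) × String) :=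
  let num := number.1
  let x := number.2.1
  let y := number.2.2
  let L : Int := (num.toList.length : Int)
  symbols.foldl (fun out uv =>
    if L ≠ 0 ∧ (uv.2 - y).natAbs ≤ 1 ∧ x - 1 ≤ uv.1 ∧ uv.1 ≤ x + L then
      if uv.2 = y ∧ L = 1 ∧ uv.1 = x then out
      else out ++ [((uv.1, uv.2), num)]
    else out) []

-- ===== PRECONDITION & SPEC =====
def Spec_get_adjacent_gear (number : String × (Int × Int)) (symbols : List (Int × Int)) (out : List ((Int × Int) × String)) : Prop := out = get_adjacent_gear_alt number symbols
instance (number : String × (Int × Int)) (symbols : List (Int × Int)) (out : List ((Int × Int) × String)) : Decidable (Spec_get_adjacent_gear number symbols out) := by unfold Spec_get_adjacent_gear; infer_instance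

-- ===== CLAIM (what is proved, stated in full; the proofs are below) =====
def Claim_equal_get_adjacent_gear : Prop := ∀ (number : String × (Int × Int)) (symbols : List (Int × Int)), Dom_get_adjacent_gear number symbols → Spec_get_adjacent_gear number symbols (get_adjacent_gear number symbols)

-- ===== LEMMAS AND PROOFS =====

lemma pvInnerA_iff (x y u v : Int) (ls : List Int) :
    pvInnerA x y u v ls = true ↔ ∃ l ∈ ls,
      ((x+l, y) = (u-1, v-1) ∨ (x+l, y) = (u, v-1) ∨ (x+l, y) = (u+1, v-1)) ∨
      ((x+l, y) = (u-1, v) ∨ (x+l, y) = (u+1, v)) ∨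
      ((x+l, y) = (u-1, v+1) ∨ (x+l, y) = (u, v+1) ∨ (x+l, y) = (u+1, v+1)) := by
  induction ls with
  | nil => simp [pvInnerA]
  | cons l ls ih =>
    simp only [pvInnerA]
    split_ifs with h1 h2 h3
    · exact iff_of_true rfl ⟨l, by simp, by tauto⟩
    · exact iff_of_true rfl ⟨l, by simp, by tauto⟩
    · exact iff_of_true rfl ⟨l, by simp, by tauto⟩
    · rw [ih]
      constructor
      · rintro ⟨a, ha, hp⟩
        exact ⟨a, List.mem_cons_of_mem _ ha, hp⟩
      · rintro ⟨a, ha, hp⟩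
        rcases List.mem_cons.mp ha with rfl | ha'
        · tauto
        · exact ⟨a, ha', hp⟩

lemma pvInnerA_range_iff (x y u v L : Int) (hL : 0 ≤ L) :
    pvInnerA x y u v (PySem.List.pyRange 0 L 1) = true ↔
      (L ≠ 0 ∧ (v - y).natAbs ≤ 1 ∧ x - 1 ≤ u ∧ u ≤ x + L ∧ ¬(v = y ∧ L = 1 ∧ u = x)) := by
  rw [pvInnerA_iff]
  simp only [PySem.List.mem_pyRange_one, Prod.mk.injEq]
  constructor
  · rintro ⟨l, ⟨h0, hl⟩, hp⟩
    rcases hp with (h | h | h) | (h | h) | (h | h | h) <;> omega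
  · rintro ⟨hL0, hrow, hlo, hhi, hnot⟩
    by_cases hy : y = v
    · refine ⟨if x ≤ u - 1 then u - 1 - x else u + 1 - x, by constructor <;> split_ifs <;> omega, ?_⟩
      split_ifs <;> omega
    · refine ⟨if u < x then 0 else if x + L - 1 < u then L - 1 else u - x, by constructor <;> split_ifs <;> omega, ?_⟩
      split_ifs <;> omega

lemma step_eq (num : String) (x y : Int) (out : List ((Int × Int) × String)) (uv : Int × Int) :
    (if pvInnerA x y uv.1 uv.2 (PySem.List.pyRange 0 (num.toList.length : Int) 1) then
        out ++ [((uv.1, uv.2), num)]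
      else out) =
    (if (num.toList.length : Int) ≠ 0 ∧ (uv.2 - y).natAbs ≤ 1 ∧ x - 1 ≤ uv.1 ∧ uv.1 ≤ x + (num.toList.length : Int) then
        if uv.2 = y ∧ (num.toList.length : Int) = 1 ∧ uv.1 = x then out
        else out ++ [((uv.1, uv.2), num)]
      else out) := by
  have h := pvInnerA_range_iff x y uv.1 uv.2 (num.toList.length : Int) (by positivity)
  by_cases hA : pvInnerA x y uv.1 uv.2 (PySem.List.pyRange 0 (num.toList.length : Int) 1) = true
  · rw [if_pos hA]
    obtain ⟨h1, h2, h3, h4, h5⟩ := h.mp hA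
    rw [if_pos ⟨h1, h2, h3, h4⟩, if_neg h5]
  · rw [if_neg hA]
    rw [h] at hA
    push Not at hA
    by_cases hc : (num.toList.length : Int) ≠ 0 ∧ (uv.2 - y).natAbs ≤ 1 ∧ x - 1 ≤ uv.1 ∧ uv.1 ≤ x + (num.toList.length : Int)
    · obtain ⟨h1, h2, h3, h4⟩ := hc
      rw [if_pos ⟨h1, h2, h3, h4⟩, if_pos (hA h1 h2 h3 h4)]
    · rw [if_neg hc]

-- ===== VERDICT (by name: the statement is the Claim_ definition above) =====
theorem get_adjacent_gear_spec : Claim_equal_get_adjacent_gear := by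
  intro number symbols _
  unfold Spec_get_adjacent_gear get_adjacent_gear get_adjacent_gear_alt
  exact congrFun (congrFun (congrArg List.foldl
    (funext fun out => funext fun uv => step_eq number.1 number.2.1 number.2.2 out uv)) []) symbols
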